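-- pv_equiv track=rewrite | github.com/GabriellaPeng/Plots | data_process.py | _soil_canal
-- ===== SOURCE A (Python) =====
-- def _soil_canal(all_poly_dt, good_polys):
--     cls = ['Chuharkana, Tail', 'Buchanan, Head', 'Buchanan, Middle', 'Buchanan, Tail',
--            'Farida, Head', 'Farida, Middle',
--            'Farida, Tail', 'Jhang, Middle', 'Jhang, Tail']
--
--     s_p = {c: [] for c in cls}
--
--     if good_polys:  # only good evaluation polygons
--         for p in all_poly_dt:
--             if p ==175:  # CT
--                 s_p[cls[0]].append(p)
--             # elif p == 185:  # BH
--             #     s_p[cls[1]].append(p)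
--             # elif p == 36:  # BM
--             #     s_p[cls[2]].append(p)
--             # elif p == 125:  # BT
--             #     s_p[cls[3]].append(p)
--             # elif p in (76, 71):  # FH
--             #     s_p[cls[4]].append(p)
--             # elif p == 168:  # FM
--             #     s_p[cls[5]].append(p)
--             elif p == 178:  # FT 130, 174,
--                 s_p[cls[6]].append(p)
--             # elif p == 22:  # JM
--             #     s_p[cls[7]].append(p)
--             # elif p == 50:  # JT
--             #     s_p[cls[8]].append(p)
--     else:
--         for p in all_poly_dt:
--             if p in (143, 164, 175, 203):  # CT
--                 s_p[cls[0]].append(p)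
--             elif p in (17, 52, 185):  # BH
--                 s_p[cls[1]].append(p)
--             elif p in (36, 85, 132):  # BM
--                 s_p[cls[2]].append(p)
--             elif p in (110, 125, 215):  # BT
--                 s_p[cls[3]].append(p)
--             elif p in (7, 13, 76, 71):  # FH
--                 s_p[cls[4]].append(p)
--             elif p in (25, 77, 123, 168, 171):  # FM
--                 s_p[cls[5]].append(p)
--             elif p in (54, 130, 172, 174, 178, 187, 191, 202, 205):  # FT
--                 s_p[cls[6]].append(p)
--             elif p in (16, 22, 80, 94):  # JM
--                 s_p[cls[7]].append(p)
--             elif p in (50, 121):  # JT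
--                 s_p[cls[8]].append(p)
--     return s_p
-- ===== SOURCE B (Python) =====
-- def _soil_canal(all_poly_dt, good_polys):
--     cls = ['Chuharkana, Tail', 'Buchanan, Head', 'Buchanan, Middle', 'Buchanan, Tail',
--            'Farida, Head', 'Farida, Middle',
--            'Farida, Tail', 'Jhang, Middle', 'Jhang, Tail']
--     full_ids = [[143, 164, 175, 203], [17, 52, 185], [36, 85, 132], [110, 125, 215],
--                 [7, 13, 76, 71], [25, 77, 123, 168, 171],
--                 [54, 130, 172, 174, 178, 187, 191, 202, 205], [16, 22, 80, 94], [50, 121]]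
--     good_ids = [[175], [], [], [], [], [], [178], [], []]
--     ids = good_ids if good_polys else full_ids
--     return {c: [p for p in all_poly_dt if p in ids_c]
--             for c, ids_c in zip(cls, ids)}
-- ===== Notes on version B (the rewrite author's own statement) =====
-- stated objective: alternative
-- what changed: Instead of A's single pass dispatching each element through a nine-branch if/elif chain into mutable buckets, B builds each category bucket independently with its own filter pass over the input (a dict comprehension of nine filters, the id lists selected by good_polys); equal because the nine id sets are disjoint.
import Mathlib
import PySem

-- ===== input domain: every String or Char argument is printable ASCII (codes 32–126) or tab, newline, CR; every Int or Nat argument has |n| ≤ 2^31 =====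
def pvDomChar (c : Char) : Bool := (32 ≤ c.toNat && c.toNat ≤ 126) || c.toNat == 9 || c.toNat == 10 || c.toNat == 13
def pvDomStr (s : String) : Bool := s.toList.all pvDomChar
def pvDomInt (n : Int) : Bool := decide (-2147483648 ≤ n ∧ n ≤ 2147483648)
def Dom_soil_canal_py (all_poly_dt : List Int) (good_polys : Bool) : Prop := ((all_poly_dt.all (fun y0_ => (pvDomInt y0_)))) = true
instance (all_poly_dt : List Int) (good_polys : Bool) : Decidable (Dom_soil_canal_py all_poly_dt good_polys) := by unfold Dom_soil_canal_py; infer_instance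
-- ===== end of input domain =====

set_option maxRecDepth 40000
set_option maxHeartbeats 1000000

-- B builds each of the nine buckets by its own filter pass over the input (one pass per
-- category), instead of A's single pass dispatching each element through a nine-branch
-- if/elif chain; equal because the nine id sets are disjoint (objective: alternative).

-- ===== PORT A =====
-- A's dict of 9 empty buckets
def scInitA : PySem.Dict String (List Int) :=
  PySem.Dict.ofList ((["Chuharkana, Tail", "Buchanan, Head", "Buchanan, Middle", "Buchanan, Tail",
    "Farida, Head", "Farida, Middle", "Farida, Tail", "Jhang, Middle", "Jhang, Tail"] : List String).map
      (fun c => (c, ([] : List Int))))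

-- loop body of A's good_polys branch
def scStepGoodA (d : PySem.Dict String (List Int)) (p : Int) : PySem.Dict String (List Int) :=
  if p = 175 then d.modify "Chuharkana, Tail" [] (· ++ [p])
  else if p = 178 then d.modify "Farida, Tail" [] (· ++ [p])
  else d

-- loop body of A's else branch
def scStepFullA (d : PySem.Dict String (List Int)) (p : Int) : PySem.Dict String (List Int) :=
  if p ∈ ([143, 164, 175, 203] : List Int) then d.modify "Chuharkana, Tail" [] (· ++ [p])
    else if p ∈ ([17, 52, 185] : List Int) then d.modify "Buchanan, Head" [] (· ++ [p])
    else if p ∈ ([36, 85, 132] : List Int) then d.modify "Buchanan, Middle" [] (· ++ [p])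
    else if p ∈ ([110, 125, 215] : List Int) then d.modify "Buchanan, Tail" [] (· ++ [p])
    else if p ∈ ([7, 13, 76, 71] : List Int) then d.modify "Farida, Head" [] (· ++ [p])
    else if p ∈ ([25, 77, 123, 168, 171] : List Int) then d.modify "Farida, Middle" [] (· ++ [p])
    else if p ∈ ([54, 130, 172, 174, 178, 187, 191, 202, 205] : List Int) then d.modify "Farida, Tail" [] (· ++ [p])
    else if p ∈ ([16, 22, 80, 94] : List Int) then d.modify "Jhang, Middle" [] (· ++ [p])
    else if p ∈ ([50, 121] : List Int) then d.modify "Jhang, Tail" [] (· ++ [p])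
  else d

def soil_canal_py (all_poly_dt : List Int) (good_polys : Bool) : List (String × List Int) :=
  (if good_polys then all_poly_dt.foldl scStepGoodA scInitA
   else all_poly_dt.foldl scStepFullA scInitA).items

-- ===== PORT B =====
-- Source B's cls, full_ids, good_ids
def scCls : List String :=
  ["Chuharkana, Tail", "Buchanan, Head", "Buchanan, Middle", "Buchanan, Tail",
   "Farida, Head", "Farida, Middle", "Farida, Tail", "Jhang, Middle", "Jhang, Tail"]

def scFullIds : List (List Int) :=
  [[143, 164, 175, 203], [17, 52, 185], [36, 85, 132], [110, 125, 215], [7, 13, 76, 71], [25, 77, 123, 168, 171], [54, 130, 172, 174, 178, 187, 191, 202, 205], [16, 22, 80, 94], [50, 121]]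

def scGoodIds : List (List Int) :=
  [[175], [], [], [], [], [], [178], [], []]

-- Source B's dict comprehension over zip(cls, ids): one filter pass of all_poly_dt per category
def soil_canal_py_alt (all_poly_dt : List Int) (good_polys : Bool) : List (String × List Int) :=
  let ids := if good_polys then scGoodIds else scFullIds
  (PySem.Dict.ofList ((scCls.zip ids).map
      (fun ci => (ci.1, all_poly_dt.filter (fun q => decide (q ∈ ci.2)))))).items

-- ===== PRECONDITION & SPEC =====
def Spec_soil_canal_py (all_poly_dt : List Int) (good_polys : Bool) (out : List (String × List Int)) : Prop := out = soil_canal_py_alt all_poly_dt good_polys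
instance (all_poly_dt : List Int) (good_polys : Bool) (out : List (String × List Int)) : Decidable (Spec_soil_canal_py all_poly_dt good_polys out) := by unfold Spec_soil_canal_py; infer_instance

-- ===== CLAIM (what is proved, stated in full; the proofs are below) =====
def Claim_equal_soil_canal_py : Prop := ∀ (all_poly_dt : List Int) (good_polys : Bool), Dom_soil_canal_py all_poly_dt good_polys → Spec_soil_canal_py all_poly_dt good_polys (soil_canal_py all_poly_dt good_polys)

-- ===== LEMMAS AND PROOFS =====

-- appending [p] to the i-th bucket of the 9-bucket state (one lemma per bucket, each `rfl`)
theorem scModify_0 (p : Int) (a0 a1 a2 a3 a4 a5 a6 a7 a8 : List Int) :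
    (PySem.Dict.mk [("Chuharkana, Tail", a0), ("Buchanan, Head", a1), ("Buchanan, Middle", a2), ("Buchanan, Tail", a3), ("Farida, Head", a4), ("Farida, Middle", a5), ("Farida, Tail", a6), ("Jhang, Middle", a7), ("Jhang, Tail", a8)]).modify "Chuharkana, Tail" [] (· ++ [p]) = PySem.Dict.mk [("Chuharkana, Tail", a0 ++ [p]), ("Buchanan, Head", a1), ("Buchanan, Middle", a2), ("Buchanan, Tail", a3), ("Farida, Head", a4), ("Farida, Middle", a5), ("Farida, Tail", a6), ("Jhang, Middle", a7), ("Jhang, Tail", a8)] := rfl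

theorem scModify_1 (p : Int) (a0 a1 a2 a3 a4 a5 a6 a7 a8 : List Int) :
    (PySem.Dict.mk [("Chuharkana, Tail", a0), ("Buchanan, Head", a1), ("Buchanan, Middle", a2), ("Buchanan, Tail", a3), ("Farida, Head", a4), ("Farida, Middle", a5), ("Farida, Tail", a6), ("Jhang, Middle", a7), ("Jhang, Tail", a8)]).modify "Buchanan, Head" [] (· ++ [p]) = PySem.Dict.mk [("Chuharkana, Tail", a0), ("Buchanan, Head", a1 ++ [p]), ("Buchanan, Middle", a2), ("Buchanan, Tail", a3), ("Farida, Head", a4), ("Farida, Middle", a5), ("Farida, Tail", a6), ("Jhang, Middle", a7), ("Jhang, Tail", a8)] := rfl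

theorem scModify_2 (p : Int) (a0 a1 a2 a3 a4 a5 a6 a7 a8 : List Int) :
    (PySem.Dict.mk [("Chuharkana, Tail", a0), ("Buchanan, Head", a1), ("Buchanan, Middle", a2), ("Buchanan, Tail", a3), ("Farida, Head", a4), ("Farida, Middle", a5), ("Farida, Tail", a6), ("Jhang, Middle", a7), ("Jhang, Tail", a8)]).modify "Buchanan, Middle" [] (· ++ [p]) = PySem.Dict.mk [("Chuharkana, Tail", a0), ("Buchanan, Head", a1), ("Buchanan, Middle", a2 ++ [p]), ("Buchanan, Tail", a3), ("Farida, Head", a4), ("Farida, Middle", a5), ("Farida, Tail", a6), ("Jhang, Middle", a7), ("Jhang, Tail", a8)] := rfl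

theorem scModify_3 (p : Int) (a0 a1 a2 a3 a4 a5 a6 a7 a8 : List Int) :
    (PySem.Dict.mk [("Chuharkana, Tail", a0), ("Buchanan, Head", a1), ("Buchanan, Middle", a2), ("Buchanan, Tail", a3), ("Farida, Head", a4), ("Farida, Middle", a5), ("Farida, Tail", a6), ("Jhang, Middle", a7), ("Jhang, Tail", a8)]).modify "Buchanan, Tail" [] (· ++ [p]) = PySem.Dict.mk [("Chuharkana, Tail", a0), ("Buchanan, Head", a1), ("Buchanan, Middle", a2), ("Buchanan, Tail", a3 ++ [p]), ("Farida, Head", a4), ("Farida, Middle", a5), ("Farida, Tail", a6), ("Jhang, Middle", a7), ("Jhang, Tail", a8)] := rfl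

theorem scModify_4 (p : Int) (a0 a1 a2 a3 a4 a5 a6 a7 a8 : List Int) :
    (PySem.Dict.mk [("Chuharkana, Tail", a0), ("Buchanan, Head", a1), ("Buchanan, Middle", a2), ("Buchanan, Tail", a3), ("Farida, Head", a4), ("Farida, Middle", a5), ("Farida, Tail", a6), ("Jhang, Middle", a7), ("Jhang, Tail", a8)]).modify "Farida, Head" [] (· ++ [p]) = PySem.Dict.mk [("Chuharkana, Tail", a0), ("Buchanan, Head", a1), ("Buchanan, Middle", a2), ("Buchanan, Tail", a3), ("Farida, Head", a4 ++ [p]), ("Farida, Middle", a5), ("Farida, Tail", a6), ("Jhang, Middle", a7), ("Jhang, Tail", a8)] := rfl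

theorem scModify_5 (p : Int) (a0 a1 a2 a3 a4 a5 a6 a7 a8 : List Int) :
    (PySem.Dict.mk [("Chuharkana, Tail", a0), ("Buchanan, Head", a1), ("Buchanan, Middle", a2), ("Buchanan, Tail", a3), ("Farida, Head", a4), ("Farida, Middle", a5), ("Farida, Tail", a6), ("Jhang, Middle", a7), ("Jhang, Tail", a8)]).modify "Farida, Middle" [] (· ++ [p]) = PySem.Dict.mk [("Chuharkana, Tail", a0), ("Buchanan, Head", a1), ("Buchanan, Middle", a2), ("Buchanan, Tail", a3), ("Farida, Head", a4), ("Farida, Middle", a5 ++ [p]), ("Farida, Tail", a6), ("Jhang, Middle", a7), ("Jhang, Tail", a8)] := rfl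

theorem scModify_6 (p : Int) (a0 a1 a2 a3 a4 a5 a6 a7 a8 : List Int) :
    (PySem.Dict.mk [("Chuharkana, Tail", a0), ("Buchanan, Head", a1), ("Buchanan, Middle", a2), ("Buchanan, Tail", a3), ("Farida, Head", a4), ("Farida, Middle", a5), ("Farida, Tail", a6), ("Jhang, Middle", a7), ("Jhang, Tail", a8)]).modify "Farida, Tail" [] (· ++ [p]) = PySem.Dict.mk [("Chuharkana, Tail", a0), ("Buchanan, Head", a1), ("Buchanan, Middle", a2), ("Buchanan, Tail", a3), ("Farida, Head", a4), ("Farida, Middle", a5), ("Farida, Tail", a6 ++ [p]), ("Jhang, Middle", a7), ("Jhang, Tail", a8)] := rfl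

theorem scModify_7 (p : Int) (a0 a1 a2 a3 a4 a5 a6 a7 a8 : List Int) :
    (PySem.Dict.mk [("Chuharkana, Tail", a0), ("Buchanan, Head", a1), ("Buchanan, Middle", a2), ("Buchanan, Tail", a3), ("Farida, Head", a4), ("Farida, Middle", a5), ("Farida, Tail", a6), ("Jhang, Middle", a7), ("Jhang, Tail", a8)]).modify "Jhang, Middle" [] (· ++ [p]) = PySem.Dict.mk [("Chuharkana, Tail", a0), ("Buchanan, Head", a1), ("Buchanan, Middle", a2), ("Buchanan, Tail", a3), ("Farida, Head", a4), ("Farida, Middle", a5), ("Farida, Tail", a6), ("Jhang, Middle", a7 ++ [p]), ("Jhang, Tail", a8)] := rfl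

theorem scModify_8 (p : Int) (a0 a1 a2 a3 a4 a5 a6 a7 a8 : List Int) :
    (PySem.Dict.mk [("Chuharkana, Tail", a0), ("Buchanan, Head", a1), ("Buchanan, Middle", a2), ("Buchanan, Tail", a3), ("Farida, Head", a4), ("Farida, Middle", a5), ("Farida, Tail", a6), ("Jhang, Middle", a7), ("Jhang, Tail", a8)]).modify "Jhang, Tail" [] (· ++ [p]) = PySem.Dict.mk [("Chuharkana, Tail", a0), ("Buchanan, Head", a1), ("Buchanan, Middle", a2), ("Buchanan, Tail", a3), ("Farida, Head", a4), ("Farida, Middle", a5), ("Farida, Tail", a6), ("Jhang, Middle", a7), ("Jhang, Tail", a8 ++ [p])] := rfl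

theorem scIteConsAppend (c : Prop) [Decidable c] (p : Int) (l : List Int) :
    (if c then [p] else []) ++ l = if c then p :: l else l := by
  split_ifs <;> simp

-- one step of A's full-mode chain sends a 9-bucket state to the same state with p filtered
-- into the (at most one, by disjointness) bucket whose id set contains it
theorem scStepFullA_eq (p : Int) (a0 a1 a2 a3 a4 a5 a6 a7 a8 : List Int) :
    scStepFullA (PySem.Dict.mk [("Chuharkana, Tail", a0), ("Buchanan, Head", a1), ("Buchanan, Middle", a2), ("Buchanan, Tail", a3), ("Farida, Head", a4), ("Farida, Middle", a5), ("Farida, Tail", a6), ("Jhang, Middle", a7), ("Jhang, Tail", a8)]) p = PySem.Dict.mk [("Chuharkana, Tail", a0 ++ List.filter (fun q => decide (q ∈ ([143, 164, 175, 203] : List Int))) [p]), ("Buchanan, Head", a1 ++ List.filter (fun q => decide (q ∈ ([17, 52, 185] : List Int))) [p]), ("Buchanan, Middle", a2 ++ List.filter (fun q => decide (q ∈ ([36, 85, 132] : List Int))) [p]), ("Buchanan, Tail", a3 ++ List.filter (fun q => decide (q ∈ ([110, 125, 215] : List Int))) [p]), ("Farida, Head", a4 ++ List.filter (fun q => decide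 (q ∈ ([7, 13, 76, 71] : List Int))) [p]), ("Farida, Middle", a5 ++ List.filter (fun q => decide (q ∈ ([25, 77, 123, 168, 171] : List Int))) [p]), ("Farida, Tail", a6 ++ List.filter (fun q => decide (q ∈ ([54, 130, 172, 174, 178, 187, 191, 202, 205] : List Int))) [p]), ("Jhang, Middle", a7 ++ List.filter (fun q => decide (q ∈ ([16, 22, 80, 94] : List Int))) [p]), ("Jhang, Tail", a8 ++ List.filter (fun q => decide (q ∈ ([50, 121] : List Int))) [p])] := by
  unfold scStepFullA
  by_cases h0 : p ∈ ([143, 164, 175, 203] : List Int)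
  · simp only [if_pos h0, scModify_0]
    simp only [List.mem_cons, List.not_mem_nil, or_false] at h0
    rcases h0 with rfl|rfl|rfl|rfl <;> simp
  simp only [if_neg h0]
  by_cases h1 : p ∈ ([17, 52, 185] : List Int)
  · simp only [if_pos h1, scModify_1]
    simp only [List.mem_cons, List.not_mem_nil, or_false] at h1
    rcases h1 with rfl|rfl|rfl <;> simp
  simp only [if_neg h1]
  by_cases h2 : p ∈ ([36, 85, 132] : List Int)
  · simp only [if_pos h2, scModify_2]
    simp only [List.mem_cons, List.not_mem_nil, or_false] at h2
    rcases h2 with rfl|rfl|rfl <;> simp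
  simp only [if_neg h2]
  by_cases h3 : p ∈ ([110, 125, 215] : List Int)
  · simp only [if_pos h3, scModify_3]
    simp only [List.mem_cons, List.not_mem_nil, or_false] at h3
    rcases h3 with rfl|rfl|rfl <;> simp
  simp only [if_neg h3]
  by_cases h4 : p ∈ ([7, 13, 76, 71] : List Int)
  · simp only [if_pos h4, scModify_4]
    simp only [List.mem_cons, List.not_mem_nil, or_false] at h4
    rcases h4 with rfl|rfl|rfl|rfl <;> simp
  simp only [if_neg h4]
  by_cases h5 : p ∈ ([25, 77, 123, 168, 171] : List Int)
  · simp only [if_pos h5, scModify_5]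
    simp only [List.mem_cons, List.not_mem_nil, or_false] at h5
    rcases h5 with rfl|rfl|rfl|rfl|rfl <;> simp
  simp only [if_neg h5]
  by_cases h6 : p ∈ ([54, 130, 172, 174, 178, 187, 191, 202, 205] : List Int)
  · simp only [if_pos h6, scModify_6]
    simp only [List.mem_cons, List.not_mem_nil, or_false] at h6
    rcases h6 with rfl|rfl|rfl|rfl|rfl|rfl|rfl|rfl|rfl <;> simp
  simp only [if_neg h6]
  by_cases h7 : p ∈ ([16, 22, 80, 94] : List Int)
  · simp only [if_pos h7, scModify_7]
    simp only [List.mem_cons, List.not_mem_nil, or_false] at h7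
    rcases h7 with rfl|rfl|rfl|rfl <;> simp
  simp only [if_neg h7]
  by_cases h8 : p ∈ ([50, 121] : List Int)
  · simp only [if_pos h8, scModify_8]
    simp only [List.mem_cons, List.not_mem_nil, or_false] at h8
    rcases h8 with rfl|rfl <;> simp
  simp only [if_neg h8]
  simp only [List.mem_cons, List.not_mem_nil, or_false, not_or] at h0 h1 h2 h3 h4 h5 h6 h7 h8
  simp [List.filter_cons]
  omega

-- same for A's good-mode chain
theorem scStepGoodA_eq (p : Int) (a0 a1 a2 a3 a4 a5 a6 a7 a8 : List Int) :
    scStepGoodA (PySem.Dict.mk [("Chuharkana, Tail", a0), ("Buchanan, Head", a1), ("Buchanan, Middle", a2), ("Buchanan, Tail", a3), ("Farida, Head", a4), ("Farida, Middle", a5), ("Farida, Tail", a6), ("Jhang, Middle", a7), ("Jhang, Tail", a8)]) p = PySem.Dict.mk [("Chuharkana, Tail", a0 ++ List.filter (fun q => decide (q ∈ ([175] : List Int))) [p]), ("Buchanan, Head", a1 ++ List.filter (fun q => decide (q ∈ ([] : List Int))) [p]), ("Buchanan, Middle", a2 ++ List.filter (fun q => decide (q ∈ ([] : List Int))) [p]),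 ("Buchanan, Tail", a3 ++ List.filter (fun q => decide (q ∈ ([] : List Int))) [p]), ("Farida, Head", a4 ++ List.filter (fun q => decide (q ∈ ([] : List Int))) [p]), ("Farida, Middle", a5 ++ List.filter (fun q => decide (q ∈ ([] : List Int))) [p]), ("Farida, Tail", a6 ++ List.filter (fun q => decide (q ∈ ([178] : List Int))) [p]), ("Jhang, Middle", a7 ++ List.filter (fun q => decide (q ∈ ([] : List Int))) [p]), ("Jhang, Tail", a8 ++ List.filter (fun q => decide (q ∈ ([] : List Int))) [p])] := by
  unfold scStepGoodA
  by_cases h0 : p = 175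
  · simp only [if_pos h0, scModify_0]
    subst h0; simp
  simp only [if_neg h0]
  by_cases h6 : p = 178
  · simp only [if_pos h6, scModify_6]
    subst h6; simp
  simp only [if_neg h6]
  simp [List.filter_cons]
  omega

-- A's full-mode loop, from an arbitrary 9-bucket state
theorem scFoldFullA (t : List Int) : ∀ (a0 a1 a2 a3 a4 a5 a6 a7 a8 : List Int),
    (t.foldl scStepFullA (PySem.Dict.mk [("Chuharkana, Tail", a0), ("Buchanan, Head", a1), ("Buchanan, Middle", a2), ("Buchanan, Tail", a3), ("Farida, Head", a4), ("Farida, Middle", a5), ("Farida, Tail", a6), ("Jhang, Middle", a7), ("Jhang, Tail", a8)])).items = [("Chuharkana, Tail", a0 ++ List.filter (fun q => decide (q ∈ ([143, 164, 175, 203] : List Int))) t), ("Buchanan, Head", a1 ++ List.filter (fun q => decide (q ∈ ([17, 52, 185] : List Int))) t), ("Buchanan, Middle", a2 ++ List.filter (fun q => decide (q ∈ ([36, 85, 132] : List Int))) t), ("Buchanan, Tail", a3 ++ List.filter (fun q => decide (q ∈ ([110, 125, 215] : List Int))) t), ("Farida, Head", a4 ++ List.filter (fun q => decide (q ∈ ([7,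 13, 76, 71] : List Int))) t), ("Farida, Middle", a5 ++ List.filter (fun q => decide (q ∈ ([25, 77, 123, 168, 171] : List Int))) t), ("Farida, Tail", a6 ++ List.filter (fun q => decide (q ∈ ([54, 130, 172, 174, 178, 187, 191, 202, 205] : List Int))) t), ("Jhang, Middle", a7 ++ List.filter (fun q => decide (q ∈ ([16, 22, 80, 94] : List Int))) t), ("Jhang, Tail", a8 ++ List.filter (fun q => decide (q ∈ ([50, 121] : List Int))) t)] := by
  induction t with
  | nil => intro a0 a1 a2 a3 a4 a5 a6 a7 a8; simp
  | cons p t ih =>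
    intro a0 a1 a2 a3 a4 a5 a6 a7 a8
    rw [List.foldl_cons, scStepFullA_eq, ih]
    simp [List.filter_cons, List.append_assoc, scIteConsAppend]

-- A's good-mode loop
theorem scFoldGoodA (t : List Int) : ∀ (a0 a1 a2 a3 a4 a5 a6 a7 a8 : List Int),
    (t.foldl scStepGoodA (PySem.Dict.mk [("Chuharkana, Tail", a0), ("Buchanan, Head", a1), ("Buchanan, Middle", a2), ("Buchanan, Tail", a3), ("Farida, Head", a4), ("Farida, Middle", a5), ("Farida, Tail", a6), ("Jhang, Middle", a7), ("Jhang, Tail", a8)])).items = [("Chuharkana, Tail", a0 ++ List.filter (fun q => decide (q ∈ ([175] : List Int))) t), ("Buchanan, Head", a1 ++ List.filter (fun q => decide (q ∈ ([] : List Int))) t), ("Buchanan, Middle", a2 ++ List.filter (fun q => decide (q ∈ ([] : List Int))) t), ("Buchanan, Tail", a3 ++ List.filter (fun q => decide (q ∈ ([] : List Int))) t), ("Farida, Head", a4 ++ List.filter (fun q => decide (q ∈ ([] : List Int))) t), ("Farida, Middle", a5 ++ List.filter (fun q => decide (q ∈ ([] : List Int))) t), ("Farida, Tail", a6 ++ List.filter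 (fun q => decide (q ∈ ([178] : List Int))) t), ("Jhang, Middle", a7 ++ List.filter (fun q => decide (q ∈ ([] : List Int))) t), ("Jhang, Tail", a8 ++ List.filter (fun q => decide (q ∈ ([] : List Int))) t)] := by
  induction t with
  | nil => intro a0 a1 a2 a3 a4 a5 a6 a7 a8; simp
  | cons p t ih =>
    intro a0 a1 a2 a3 a4 a5 a6 a7 a8
    rw [List.foldl_cons, scStepGoodA_eq, ih]
    simp [List.filter_cons, List.append_assoc, scIteConsAppend]

-- ===== VERDICT (by name: the statement is the Claim_ definition above) =====
theorem soil_canal_py_spec : Claim_equal_soil_canal_py := by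
  intro l good _
  unfold Spec_soil_canal_py soil_canal_py soil_canal_py_alt
  cases good
  · show (l.foldl scStepFullA scInitA).items = _
    have h0 : scInitA = PySem.Dict.mk [("Chuharkana, Tail", ([] : List Int)), ("Buchanan, Head", ([] : List Int)), ("Buchanan, Middle", ([] : List Int)), ("Buchanan, Tail", ([] : List Int)), ("Farida, Head", ([] : List Int)), ("Farida, Middle", ([] : List Int)), ("Farida, Tail", ([] : List Int)), ("Jhang, Middle", ([] : List Int)), ("Jhang, Tail", ([] : List Int))] := rfl
    rw [h0, scFoldFullA]
    rfl
  · show (l.foldl scStepGoodA scInitA).items = _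
    have h0 : scInitA = PySem.Dict.mk [("Chuharkana, Tail", ([] : List Int)), ("Buchanan, Head", ([] : List Int)), ("Buchanan, Middle", ([] : List Int)), ("Buchanan, Tail", ([] : List Int)), ("Farida, Head", ([] : List Int)), ("Farida, Middle", ([] : List Int)), ("Farida, Tail", ([] : List Int)), ("Jhang, Middle", ([] : List Int)), ("Jhang, Tail", ([] : List Int))] := rfl
    rw [h0, scFoldGoodA]
    rfl
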